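-- pv_equiv track=rewrite | github.com/tempifyOS/steganography-project | find runs test func thing v4.py | calculate_minimum_length
-- ===== SOURCE A (Python) =====
-- def calculate_minimum_length(message, M):
--     """
--     Calculate the minimum length needed to encode a message.
--
--     For each bit in the message:
--     - '0' needs an even run of length >= M (minimum M characters if M is even, M+1 if M is odd)
--     - '1' needs an odd run of length >= M (minimum M characters)
--
--     Returns the minimum total length needed.
--     """
--     total_length = 0
--     for bit in message:
--         if bit == '1':
--             # Need odd run of length >= M
--             total_length += M
--         else:
--             # Need even run of length >= M
--             if M % 2 == 0:
--                 total_length += M  # M is already even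
--             else:
--                 total_length += M + 1  # Need M+1 to make it even
--
--     return total_length
-- ===== SOURCE B (Python) =====
-- def calculate_minimum_length(message, M):
--     # Closed form: every bit costs M; each non-'1' bit costs one extra when M is odd.
--     n = len(message)
--     ones = sum(c == '1' for c in message)
--     return n * M + (n - ones) * (M % 2)
-- ===== Notes on version B (the rewrite author's own statement) =====
-- stated objective: simpler
-- what changed: Replaces the per-character accumulation loop and its branch ladder with a single count of '1' characters and a closed-form arithmetic expression n*M + (n-ones)*(M%2).
import Mathlib
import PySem

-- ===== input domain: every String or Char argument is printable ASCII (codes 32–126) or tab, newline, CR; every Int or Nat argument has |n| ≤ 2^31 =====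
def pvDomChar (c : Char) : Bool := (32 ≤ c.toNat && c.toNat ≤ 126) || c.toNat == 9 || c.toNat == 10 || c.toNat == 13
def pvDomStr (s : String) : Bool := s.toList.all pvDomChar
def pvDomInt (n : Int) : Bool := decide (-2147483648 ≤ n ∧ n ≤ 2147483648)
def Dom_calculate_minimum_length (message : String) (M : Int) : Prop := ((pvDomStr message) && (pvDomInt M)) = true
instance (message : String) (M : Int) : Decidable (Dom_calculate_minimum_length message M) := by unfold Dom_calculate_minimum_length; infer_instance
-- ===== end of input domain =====

-- B replaces A's per-character accumulation loop by a single '1'-count and a closed-form formula (simpler).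

-- ===== PORT A =====
def calculate_minimum_length (message : String) (M : Int) : Int :=
  message.toList.foldl
    (fun total_length bit =>
      if bit == '1' then
        total_length + M
      else
        if PySem.Int.mod M 2 = 0 then
          total_length + M
        else
          total_length + (M + 1))
    0

-- ===== PORT B =====
def calculate_minimum_length_alt (message : String) (M : Int) : Int :=
  let n : Int := (PySem.Str.len message : Int)
  let ones : Int := (message.toList.countP (fun c => c == '1') : Int)
  n * M + (n - ones) * PySem.Int.mod M 2

-- ===== PRECONDITION & SPEC =====
def Spec_calculate_minimum_length (message : String) (M : Int) (out : Int) : Prop := out = calculate_minimum_length_alt message M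
instance (message : String) (M : Int) (out : Int) : Decidable (Spec_calculate_minimum_length message M out) := by unfold Spec_calculate_minimum_length; infer_instance

-- ===== CLAIM (what is proved, stated in full; the proofs are below) =====
def Claim_equal_calculate_minimum_length : Prop := ∀ (message : String) (M : Int), Dom_calculate_minimum_length message M → Spec_calculate_minimum_length message M (calculate_minimum_length message M)

-- ===== LEMMAS AND PROOFS =====

-- When M is even, every character contributes exactly M.
theorem cml_foldl_even (M : Int) (h : PySem.Int.mod M 2 = 0) (l : List Char) (acc : Int) :
    l.foldl (fun total_length bit =>
      if bit == '1' then total_length + M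
      else if PySem.Int.mod M 2 = 0 then total_length + M else total_length + (M + 1)) acc
    = acc + (l.length : Int) * M := by
  induction l generalizing acc with
  | nil => simp
  | cons c t ih =>
    rw [List.foldl_cons]
    by_cases hc : c == '1'
    · rw [if_pos hc, ih]; push_cast [List.length_cons]; ring
    · rw [if_neg hc, if_pos h, ih]; push_cast [List.length_cons]; ring

-- When M is odd, a '1' contributes M and any other character contributes M + 1.
theorem cml_foldl_odd (M : Int) (h : ¬ PySem.Int.mod M 2 = 0) (l : List Char) (acc : Int) :
    l.foldl (fun total_length bit =>
      if bit == '1' then total_length + M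
      else if PySem.Int.mod M 2 = 0 then total_length + M else total_length + (M + 1)) acc
    = acc + (l.length : Int) * M + ((l.length : Int) - (l.countP (fun c => c == '1') : Int)) := by
  induction l generalizing acc with
  | nil => simp
  | cons c t ih =>
    rw [List.foldl_cons]
    by_cases hc : c == '1'
    · rw [if_pos hc, ih]; simp only [List.length_cons, List.countP_cons, hc, if_true]; push_cast; ring
    · rw [if_neg hc, if_neg h, ih]; simp only [List.length_cons, List.countP_cons, hc]; push_cast; ring

-- M % 2 is 1 whenever it is not 0 (Python's mod with positive divisor).
theorem cml_mod_two_eq_one (M : Int) (h : ¬ PySem.Int.mod M 2 = 0) : PySem.Int.mod M 2 = 1 := by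
  have h1 := PySem.Int.mod_nonneg M (b := 2) (by norm_num)
  have h2 := PySem.Int.mod_lt M (b := 2) (by norm_num)
  omega

-- ===== VERDICT (by name: the statement is the Claim_ definition above) =====
theorem calculate_minimum_length_spec : Claim_equal_calculate_minimum_length := by
  intro message M _
  unfold Spec_calculate_minimum_length calculate_minimum_length calculate_minimum_length_alt
  simp only [PySem.Str.len_eq]  -- bridge Python len to toList.length
  by_cases h : PySem.Int.mod M 2 = 0
  · rw [cml_foldl_even M h, h]; ring
  · rw [cml_foldl_odd M h, cml_mod_two_eq_one M h]; ring
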